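-- pv_equiv track=rewrite | github.com/mindspore-ai/akg | akg-mlir/python/akg_mlir/utils/dynamic_utils.py | _get_proper_parallel_thread_config
-- ===== SOURCE A (Python) =====
-- def _get_proper_parallel_thread_config(length, is_reduce_y):
--     if is_reduce_y:
--         return 32
--     if length < 64:
--         base = 1
--         thread = 512
--         while base < length:
--             base *= 2
--             thread //= 2
--         return thread
--     return 32
-- ===== SOURCE B (Python) =====
-- def _get_proper_parallel_thread_config(length, is_reduce_y):
--     if is_reduce_y or length >= 64:
--         return 32
--     return 512 >> (max(length, 1) - 1).bit_length()
-- ===== Notes on version B (the rewrite author's own statement) =====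
-- stated objective: simpler
-- what changed: Replaced the doubling while-loop with a closed-form 512 >> (max(length,1)-1).bit_length(), merging the two 32-returning guards into one branch.
import Mathlib
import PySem

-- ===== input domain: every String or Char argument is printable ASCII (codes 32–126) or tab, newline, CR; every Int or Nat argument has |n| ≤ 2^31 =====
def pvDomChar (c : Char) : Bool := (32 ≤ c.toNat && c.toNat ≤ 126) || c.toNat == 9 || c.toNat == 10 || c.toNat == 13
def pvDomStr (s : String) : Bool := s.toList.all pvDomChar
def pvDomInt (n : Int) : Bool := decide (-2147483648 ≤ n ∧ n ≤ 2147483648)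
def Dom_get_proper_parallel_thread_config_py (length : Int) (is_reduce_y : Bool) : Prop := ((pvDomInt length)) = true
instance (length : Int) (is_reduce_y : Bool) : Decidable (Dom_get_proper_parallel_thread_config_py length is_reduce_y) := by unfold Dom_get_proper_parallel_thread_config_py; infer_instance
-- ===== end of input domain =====

-- B replaces A's doubling while-loop with a closed-form bit_length computation (objective: simpler).

-- ===== PORT A =====
-- the while-loop of A, with fuel making the recursion structural (64 steps is far more than
-- the loop can take, since base doubles from 1 and the loop only runs when length < 64)
def pvLoopA : Nat → Int → Int → Int → Int
  | 0, _, thread, _ => thread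
  | fuel + 1, base, thread, length =>
    if base < length then pvLoopA fuel (base * 2) (PySem.Int.floordiv thread 2) length
    else thread

def get_proper_parallel_thread_config_py (length : Int) (is_reduce_y : Bool) : Int :=
  if is_reduce_y then 32
  else if length < 64 then pvLoopA 64 1 512 length
  else 32

-- ===== PORT B =====
def get_proper_parallel_thread_config_py_alt (length : Int) (is_reduce_y : Bool) : Int :=
  if is_reduce_y || length ≥ 64 then 32
  else ((512 >>> PySem.Int.bitLength (max length 1 - 1) : Nat) : Int)

-- ===== PRECONDITION & SPEC =====
def Spec_get_proper_parallel_thread_config_py (length : Int) (is_reduce_y : Bool) (out : Int) : Prop := out = get_proper_parallel_thread_config_py_alt length is_reduce_y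
instance (length : Int) (is_reduce_y : Bool) (out : Int) : Decidable (Spec_get_proper_parallel_thread_config_py length is_reduce_y out) := by unfold Spec_get_proper_parallel_thread_config_py; infer_instance

-- ===== CLAIM (what is proved, stated in full; the proofs are below) =====
def Claim_equal_get_proper_parallel_thread_config_py : Prop := ∀ (length : Int) (is_reduce_y : Bool), Dom_get_proper_parallel_thread_config_py length is_reduce_y → Spec_get_proper_parallel_thread_config_py length is_reduce_y (get_proper_parallel_thread_config_py length is_reduce_y)

-- ===== LEMMAS AND PROOFS =====

-- ===== VERDICT (by name: the statement is the Claim_ definition above) =====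
theorem get_proper_parallel_thread_config_py_spec : Claim_equal_get_proper_parallel_thread_config_py := by
  intro length is_reduce_y _
  unfold Spec_get_proper_parallel_thread_config_py
  unfold get_proper_parallel_thread_config_py get_proper_parallel_thread_config_py_alt
  cases is_reduce_y with
  | true => simp
  | false =>
    simp only [Bool.false_or]
    by_cases h64 : length < 64
    · have hge : ¬ length ≥ 64 := by omega
      simp only [if_pos h64, hge, decide_false, if_false, Bool.false_eq_true]
      by_cases h1 : length ≤ 1
      · -- loop body never runs; B clamps to 1
        have hmax : max length 1 = 1 := by omega
        have hlt : ¬ (1 : Int) < length := by omega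
        simp [pvLoopA, hlt, hmax]
      · -- 2 ≤ length ≤ 63: finite case check
        interval_cases length <;> decide
    · simp [h64]
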